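-- pv_equiv track=rewrite | github.com/Surya-Vamshi/Product-Family-Design | _02_Merging/Functions/Sequencing/SimilaritiesInDSMFor2ndCell.py | SimilaritiesInDSMFor2ndCell
-- ===== SOURCE A (Python) =====
-- def SimilaritiesInDSMFor2ndCell(Var1, Var2):  # Positions in Cell2
--     """"
--     Description : Give the position in Var2 of variables that are present in Var 1
--     and Var 2 and the one that are only in Var2
--
--     Input variables :
--     Var1 : Variables of first DSM
--     Var2 : Variables of second DSM
--
--     Output Variables :
--     PositionDb : position of variables that are present in Var1 and Var2
--     PositionUnik : position of variables that are only in Var 2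
--     """
--     # Code
--     VarDb = []
--     VarUnik = []
--     for i in range(0, len(Var2)):
--         Detector = 0
--         for j in range(0, len(Var1)):
--             if Var2[i] == Var1[j]:
--                 VarDb.append(i)
--                 Detector = 1
--
--         if Detector == 0:
--             VarUnik.append(i)
--
--     PositionDb = VarDb  # Positions in Cell2
--     PositionUnik = VarUnik  # Positions in Cell2
--
--     return PositionDb, PositionUnik
-- ===== SOURCE B (Python) =====
-- def SimilaritiesInDSMFor2ndCell(Var1, Var2):
--     # Invert the comparison: index Var2's positions by value, tally hits per position
--     # by walking Var1, then rebuild both outputs from the hit-count array.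
--     pos = {}
--     for i, v in enumerate(Var2):
--         pos.setdefault(v, []).append(i)
--     hits = [0] * len(Var2)
--     for x in Var1:
--         for i in pos.get(x, ()):
--             hits[i] += 1
--     db = []
--     unik = []
--     for i, h in enumerate(hits):
--         if h:
--             db.extend([i] * h)
--         else:
--             unik.append(i)
--     return db, unik
-- ===== Notes on version B (the rewrite author's own statement) =====
-- stated objective: alternative
-- what changed: Instead of scanning Var1 for every Var2 element, B inverts the comparison: it builds a value-to-positions index of Var2, walks Var1 incrementing a per-position hit-count array through that index, and rebuilds both output lists from the hit counts in one final pass.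
import Mathlib
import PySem

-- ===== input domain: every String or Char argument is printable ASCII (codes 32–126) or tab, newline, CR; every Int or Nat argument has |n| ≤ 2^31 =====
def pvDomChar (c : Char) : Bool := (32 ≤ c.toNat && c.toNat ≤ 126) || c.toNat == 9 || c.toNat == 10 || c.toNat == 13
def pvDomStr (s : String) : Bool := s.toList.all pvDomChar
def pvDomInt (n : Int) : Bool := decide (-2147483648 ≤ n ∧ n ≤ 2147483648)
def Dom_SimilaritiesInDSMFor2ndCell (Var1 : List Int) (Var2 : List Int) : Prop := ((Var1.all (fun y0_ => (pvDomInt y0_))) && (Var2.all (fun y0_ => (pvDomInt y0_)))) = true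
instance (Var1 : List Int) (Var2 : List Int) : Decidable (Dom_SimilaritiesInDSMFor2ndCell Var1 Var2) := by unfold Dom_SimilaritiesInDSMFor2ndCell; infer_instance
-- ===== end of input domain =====

-- B inverts A's comparison: it indexes Var2's positions by value, tallies hits per position by walking Var1, and rebuilds both outputs from the hit-count array (objective: alternative).


-- ===== PORT A =====
def SimilaritiesInDSMFor2ndCell (Var1 : List Int) (Var2 : List Int) : List Int × List Int :=
  -- indices from pyRange are always in range, so pyGetD with default 0 is exact here
  (PySem.List.pyRange 0 (Var2.length : Int) 1).foldl (fun (st : List Int × List Int) i =>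
    let inner := (PySem.List.pyRange 0 (Var1.length : Int) 1).foldl
      (fun (q : List Int × Int) j =>
        if PySem.List.pyGetD Var2 i 0 = PySem.List.pyGetD Var1 j 0 then (q.1 ++ [i], 1) else q)
      (st.1, 0)
    if inner.2 = 0 then (inner.1, st.2 ++ [i]) else (inner.1, st.2)) ([], [])

-- ===== PORT B =====
def SimilaritiesInDSMFor2ndCell_alt (Var1 : List Int) (Var2 : List Int) : List Int × List Int :=
  -- pos.setdefault(v, []).append(i) mutates the stored list in place: exactly d.modify v [] (· ++ [i])
  let pos := (PySem.List.enumerate Var2 0).foldl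
    (fun (d : PySem.Dict Int (List Int)) p => d.modify p.2 [] (· ++ [p.1])) PySem.Dict.empty
  let hits0 : List Int := List.replicate Var2.length 0
  -- indices stored in pos are the nonnegative in-range positions of Var2, so pySetD/pyGetD are exact here
  let hits := Var1.foldl (fun (h : List Int) x =>
    (pos.getD x []).foldl (fun h i => PySem.List.pySetD h i (PySem.List.pyGetD h i 0 + 1)) h) hits0
  (PySem.List.enumerate hits 0).foldl (fun (st : List Int × List Int) p =>
    if p.2 ≠ 0 then (st.1 ++ PySem.List.pyRepeat [p.1] p.2, st.2) else (st.1, st.2 ++ [p.1])) ([], [])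

-- ===== PRECONDITION & SPEC =====
def Spec_SimilaritiesInDSMFor2ndCell (Var1 : List Int) (Var2 : List Int) (out : List Int × List Int) : Prop := out = SimilaritiesInDSMFor2ndCell_alt Var1 Var2
instance (Var1 : List Int) (Var2 : List Int) (out : List Int × List Int) : Decidable (Spec_SimilaritiesInDSMFor2ndCell Var1 Var2 out) := by unfold Spec_SimilaritiesInDSMFor2ndCell; infer_instance

-- ===== CLAIM (what is proved, stated in full; the proofs are below) =====
def Claim_equal_SimilaritiesInDSMFor2ndCell : Prop := ∀ (Var1 : List Int) (Var2 : List Int), Dom_SimilaritiesInDSMFor2ndCell Var1 Var2 → Spec_SimilaritiesInDSMFor2ndCell Var1 Var2 (SimilaritiesInDSMFor2ndCell Var1 Var2)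

-- ===== LEMMAS AND PROOFS =====

-- A's inner scan over Var1 appends i once per match and sets the detector iff there is a match
lemma innerA (Var1 : List Int) (v i : Int) (acc : List Int) (d : Int) :
    Var1.foldl (fun (q : List Int × Int) x => if v = x then (q.1 ++ [i], 1) else q) (acc, d)
      = (acc ++ List.replicate (Var1.count v) i, if Var1.count v = 0 then d else 1) := by
  induction Var1 generalizing acc d with
  | nil => simp
  | cons x xs ih =>
      by_cases h : v = x
      · subst h
        simp only [List.foldl_cons, ih, List.count_cons_self]
        simp [List.replicate_succ]
      · have hx : ¬ (x = v) := fun hh => h hh.symm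
        simp only [List.foldl_cons, if_neg h, ih, List.count_cons_of_ne hx]

-- one step of A's outer loop, in closed form
lemma stepA (Var1 Var2 : List Int) (i : Int) (st : List Int × List Int) :
    (let inner := (PySem.List.pyRange 0 (Var1.length : Int) 1).foldl
        (fun (q : List Int × Int) j =>
          if PySem.List.pyGetD Var2 i 0 = PySem.List.pyGetD Var1 j 0 then (q.1 ++ [i], 1) else q)
        (st.1, 0)
      if inner.2 = 0 then (inner.1, st.2 ++ [i]) else (inner.1, st.2))
    = (if Var1.count (PySem.List.pyGetD Var2 i 0) = 0
        then (st.1, st.2 ++ [i])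
        else (st.1 ++ List.replicate (Var1.count (PySem.List.pyGetD Var2 i 0)) i, st.2)) := by
  dsimp only
  have h := PySem.List.foldl_pyRange_zero_pyGetD' Var1 0
    (fun (q : List Int × Int) x => if PySem.List.pyGetD Var2 i 0 = x then (q.1 ++ [i], 1) else q)
    (st.1, 0)
  rw [h, innerA]
  by_cases hc : Var1.count (PySem.List.pyGetD Var2 i 0) = 0
  · simp [hc]
  · simp [hc]

-- positions of x in l, counted from s (what B's pos dict stores under key x)
def pvIdx (l : List Int) (s x : Int) : List Int :=
  (((PySem.List.enumerate l s).map (fun p => (p.2, p.1))).filter (fun p => p.1 == x)).map (·.2)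

lemma pvIdx_nil (s x : Int) : pvIdx [] s x = [] := by
  simp [pvIdx, PySem.List.enumerate_nil]

lemma pvIdx_cons (v : Int) (l : List Int) (s x : Int) :
    pvIdx (v :: l) s x = (if v = x then [s] else []) ++ pvIdx l (s + 1) x := by
  by_cases h : v = x <;> simp [pvIdx, PySem.List.enumerate_cons, h]

lemma pvIdx_mem (l : List Int) (s x j : Int) (hj : j ∈ pvIdx l s x) :
    s ≤ j ∧ j < s + (l.length : Int) := by
  induction l generalizing s with
  | nil => rw [pvIdx_nil] at hj; simp at hj
  | cons v l ih =>
      rw [pvIdx_cons] at hj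
      rcases List.mem_append.mp hj with h1 | h2
      · by_cases h : v = x
        · rw [if_pos h, List.mem_singleton] at h1
          simp only [List.length_cons]
          push_cast
          omega
        · rw [if_neg h] at h1; simp at h1
      · have := ih (s + 1) h2
        simp only [List.length_cons]
        push_cast
        omega

lemma pvIdx_count (l : List Int) (s x : Int) (k : Nat) (hk : k < l.length) :
    (pvIdx l s x).count (s + (k : Int)) = if l.getD k 0 = x then 1 else 0 := by
  induction l generalizing s k with
  | nil => simp at hk
  | cons v l ih =>
      rw [pvIdx_cons, List.count_append]
      cases k with
      | zero =>
          have h0 : (pvIdx l (s + 1) x).count (s + ((0 : Nat) : Int)) = 0 := by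
            rw [List.count_eq_zero]
            intro hmem
            have := pvIdx_mem l (s + 1) x _ hmem
            omega
          rw [h0]
          by_cases h : v = x <;> simp [h]
      | succ k =>
          have hk' : k < l.length := by simpa using hk
          have harith : s + ((k + 1 : Nat) : Int) = (s + 1) + (k : Int) := by push_cast; ring
          rw [harith, ih (s + 1) k hk']
          have hfst : ((if v = x then [s] else []) : List Int).count ((s + 1) + (k : Int)) = 0 := by
            by_cases h : v = x
            · rw [if_pos h, List.count_eq_zero]
              intro hm
              rw [List.mem_singleton] at hm
              omega
            · rw [if_neg h]; rfl
          rw [hfst]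
          simp

-- the increment loop preserves the length of hits
lemma pvFold_length (L : List Int) (h : List Int) :
    (L.foldl (fun h i => PySem.List.pySetD h i (PySem.List.pyGetD h i 0 + 1)) h).length
      = h.length := by
  induction L generalizing h with
  | nil => rfl
  | cons i L ih => simp [List.foldl_cons, ih, PySem.List.length_pySetD]

lemma pv_count_cons (a b : Int) (l : List Int) :
    (b :: l).count a = l.count a + (if a = b then 1 else 0) := by
  rw [List.count_cons]
  by_cases h : a = b
  · simp [h]
  · have h2 : b ≠ a := Ne.symm h
    simp [h, h2]

-- pointwise effect of the increment loop: entry k grows by the number of occurrences of k in L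
lemma pvFold_getD (L : List Int) (h : List Int) (k : Nat) (hk : k < h.length)
    (hL : ∀ i ∈ L, 0 ≤ i) :
    (L.foldl (fun h i => PySem.List.pySetD h i (PySem.List.pyGetD h i 0 + 1)) h).getD k 0
      = h.getD k 0 + (L.count (k : Int) : Int) := by
  induction L generalizing h with
  | nil => simp
  | cons i L ih =>
      have hi : 0 ≤ i := hL i List.mem_cons_self
      have hrest : ∀ j ∈ L, 0 ≤ j := fun j hj => hL j (List.mem_cons_of_mem _ hj)
      rw [List.foldl_cons]
      have hset : PySem.List.pySetD h i (PySem.List.pyGetD h i 0 + 1)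
          = h.set i.toNat (h.getD i.toNat 0 + 1) := by
        rw [PySem.List.pySetD_of_nonneg _ _ hi, PySem.List.pyGetD_of_nonneg _ _ hi]
      rw [hset]
      have hklen : k < (h.set i.toNat (h.getD i.toNat 0 + 1)).length := by
        simpa using hk
      rw [ih _ hklen hrest]
      have hklen2 : k < (h.set i.toNat (h.getD i.toNat 0 + 1)).length := by simpa using hk
      rw [List.getD_eq_getElem _ _ hklen2, List.getElem_set, ← List.getD_eq_getElem h 0 hk,
          pv_count_cons]
      by_cases hik : i = (k : Int)
      · have htn : i.toNat = k := by omega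
        rw [if_pos htn, htn, if_pos hik.symm]
        push_cast
        ring
      · have htn : i.toNat ≠ k := by omega
        rw [if_neg htn, if_neg (fun hh => hik hh.symm)]
        simp

-- the whole tally phase: entry k of hits ends as the number of copies of Var2[k] in Var1
lemma pvOuter (Var2 : List Int) (V : List Int) (h : List Int) (k : Nat)
    (hlen : h.length = Var2.length) (hk : k < Var2.length) :
    (V.foldl (fun h x =>
        (pvIdx Var2 0 x).foldl (fun h i => PySem.List.pySetD h i (PySem.List.pyGetD h i 0 + 1)) h) h).getD k 0
      = h.getD k 0 + (V.count (Var2.getD k 0) : Int) := by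
  induction V generalizing h with
  | nil => simp
  | cons x V ih =>
      rw [List.foldl_cons]
      have hb : ∀ i ∈ pvIdx Var2 0 x, 0 ≤ i := fun i hi => by
        have := pvIdx_mem Var2 0 x i hi; omega
      have hlen' : ((pvIdx Var2 0 x).foldl
          (fun h i => PySem.List.pySetD h i (PySem.List.pyGetD h i 0 + 1)) h).length = Var2.length := by
        rw [pvFold_length, hlen]
      rw [ih _ hlen', pvFold_getD _ h k (by omega) hb]
      have hc := pvIdx_count Var2 0 x k hk
      rw [show (0 : Int) + (k : Int) = (k : Int) by ring] at hc
      rw [hc, pv_count_cons]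
      split_ifs with hv <;> push_cast <;> ring

lemma pvOuter_length (Var2 V : List Int) (h : List Int) :
    (V.foldl (fun h x =>
        (pvIdx Var2 0 x).foldl (fun h i => PySem.List.pySetD h i (PySem.List.pyGetD h i 0 + 1)) h) h).length
      = h.length := by
  induction V generalizing h with
  | nil => rfl
  | cons x V ih => rw [List.foldl_cons, ih, pvFold_length]

-- B's hits array is the per-position multiplicity map
lemma pvHits (Var1 Var2 : List Int) :
    Var1.foldl (fun h x =>
        (pvIdx Var2 0 x).foldl (fun h i => PySem.List.pySetD h i (PySem.List.pyGetD h i 0 + 1)) h)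
      (List.replicate Var2.length 0)
      = Var2.map (fun v => (Var1.count v : Int)) := by
  apply List.ext_getElem
  · rw [pvOuter_length]; simp
  · intro k h1 h2
    have hk : k < Var2.length := by simpa using h2
    have hlen : (List.replicate Var2.length (0 : Int)).length = Var2.length := by simp
    have := pvOuter Var2 Var1 (List.replicate Var2.length 0) k hlen hk
    rw [List.getD_eq_getElem _ _ h1] at this
    rw [this]
    simp only [List.getElem_map]
    rw [List.getD_eq_getElem _ _ (show k < (List.replicate Var2.length (0 : Int)).length by
          simpa using hk),
        List.getElem_replicate, List.getD_eq_getElem _ _ hk]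
    simp

-- B's pos dict stores under x exactly the positions of x in Var2
lemma pos_getD (Var2 : List Int) (x : Int) :
    ((PySem.List.enumerate Var2 0).foldl
        (fun (d : PySem.Dict Int (List Int)) p => d.modify p.2 [] (· ++ [p.1]))
        PySem.Dict.empty).getD x []
      = pvIdx Var2 0 x := by
  have hmap : (PySem.List.enumerate Var2 0).foldl
        (fun (d : PySem.Dict Int (List Int)) p => d.modify p.2 [] (· ++ [p.1])) PySem.Dict.empty
      = ((PySem.List.enumerate Var2 0).map (fun p => (p.2, p.1))).foldl
        (fun (d : PySem.Dict Int (List Int)) q => d.modify q.1 [] (· ++ [q.2])) PySem.Dict.empty := by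
    rw [List.foldl_map]
  rw [hmap, PySem.Dict.getD_foldl_modify_append, PySem.Dict.getD_empty]
  simp [pvIdx]

lemma enum_map {α β : Type} (g : α → β) (l : List α) (s : Int) :
    PySem.List.enumerate (l.map g) s = (PySem.List.enumerate l s).map (fun p => (p.1, g p.2)) := by
  induction l generalizing s with
  | nil => simp [PySem.List.enumerate_nil]
  | cons v l ih => simp [PySem.List.enumerate_cons, ih]

-- ===== VERDICT (by name: the statement is the Claim_ definition above) =====
theorem SimilaritiesInDSMFor2ndCell_spec : Claim_equal_SimilaritiesInDSMFor2ndCell := by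
  intro Var1 Var2 _
  unfold Spec_SimilaritiesInDSMFor2ndCell SimilaritiesInDSMFor2ndCell SimilaritiesInDSMFor2ndCell_alt
  simp only [pos_getD, pvHits]
  rw [enum_map, List.foldl_map, PySem.List.enumerate_eq_map_pyRange Var2 0, List.foldl_map]
  simp only [PySem.List.len_eq]
  have hstep : (fun (st : List Int × List Int) i =>
      let inner := (PySem.List.pyRange 0 (Var1.length : Int) 1).foldl
        (fun (q : List Int × Int) j =>
          if PySem.List.pyGetD Var2 i 0 = PySem.List.pyGetD Var1 j 0 then (q.1 ++ [i], 1) else q)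
        (st.1, 0)
      if inner.2 = 0 then (inner.1, st.2 ++ [i]) else (inner.1, st.2))
    = (fun (st : List Int × List Int) j =>
        if ((Var1.count (PySem.List.pyGetD Var2 j 0) : Int) ≠ 0)
          then (st.1 ++ PySem.List.pyRepeat [j] (Var1.count (PySem.List.pyGetD Var2 j 0) : Int), st.2)
          else (st.1, st.2 ++ [j])) := by
    funext st i
    rw [stepA Var1 Var2 i st]
    simp only [PySem.List.pyRepeat_singleton]
    by_cases hc : Var1.count (PySem.List.pyGetD Var2 i 0) = 0
    · simp [hc]
    · simp [hc]
  rw [hstep]
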